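-- pv_equiv track=rewrite | github.com/timgzhou/ever-changing-modality | res/to_latex.py | _apply_multirow
-- ===== SOURCE A (Python) =====
-- def _escape(s):
--     """Minimal LaTeX escaping for cell content."""
--     return str(s).replace('→', r'$\to$').replace('±', r'$\pm$')
--
-- def _multirow(n, s):
--     return rf'\multirow{{{n}}}{{*}}{{{s}}}'
--
-- def _apply_multirow(col_values):
--     # Replace repeated consecutive values with \multirow{n}{*}{val} + empty strings.
--     result = []
--     i = 0
--     while i < len(col_values):
--         val = col_values[i]
--         j = i + 1
--         while j < len(col_values) and col_values[j] == val:
--             j += 1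
--         n = j - i
--         result.append(_multirow(n, _escape(val)) if n > 1 else _escape(val))
--         result.extend([''] * (n - 1))
--         i = j
--     return result
-- ===== SOURCE B (Python) =====
-- def _escape(s):
--     """Minimal LaTeX escaping for cell content."""
--     return str(s).replace('→', r'$\to$').replace('±', r'$\pm$')
--
-- def _multirow(n, s):
--     return rf'\multirow{{{n}}}{{*}}{{{s}}}'
--
-- def _run_lengths(col_values):
--     # Backward DP: runlen[k] = length of the maximal run of equal values starting at k.
--     runlen = []
--     for k in range(len(col_values) - 1, -1, -1):
--         if runlen and col_values[k] == col_values[k + 1]: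
--             runlen.append(runlen[-1] + 1)
--         else:
--             runlen.append(1)
--     runlen.reverse()
--     return runlen
--
-- def _apply_multirow(col_values):
--     # Two staged passes, output built positionally (no run emission):
--     # a cell is '' iff it equals its predecessor, otherwise it starts a run
--     # whose length the DP table already holds.
--     runlen = _run_lengths(col_values)
--     prev = [None] + col_values
--     return [
--         '' if p == v
--         else (_multirow(n, _escape(v)) if n > 1 else _escape(v))
--         for v, p, n in zip(col_values, prev, runlen)
--     ]
-- ===== Notes on version B (the rewrite author's own statement) =====
-- stated objective: alternative
-- what changed: Replaced A's cursor-driven run scanning that emits a block per run with two staged passes: a backward DP table of run lengths starting at each index, then a positional map that outputs '' for any cell equal to its predecessor and renders a run header from the table otherwise.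
import Mathlib
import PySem

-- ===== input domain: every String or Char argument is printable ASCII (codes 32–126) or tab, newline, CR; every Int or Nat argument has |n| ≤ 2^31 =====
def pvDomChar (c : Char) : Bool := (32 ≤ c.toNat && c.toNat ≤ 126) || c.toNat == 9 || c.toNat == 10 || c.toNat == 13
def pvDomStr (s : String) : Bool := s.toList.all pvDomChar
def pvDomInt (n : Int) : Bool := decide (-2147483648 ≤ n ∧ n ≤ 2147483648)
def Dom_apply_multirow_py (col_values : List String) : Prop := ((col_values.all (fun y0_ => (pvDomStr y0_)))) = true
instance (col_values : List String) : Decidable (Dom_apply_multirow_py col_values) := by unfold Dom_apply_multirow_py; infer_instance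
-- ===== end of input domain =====

-- B replaces A's cursor-driven run scanning (emit a block per run) by two staged passes:
-- a backward DP table of run lengths starting at each index, then a positional map that
-- outputs '' for a cell equal to its predecessor; alternative decomposition (no speed claim).
-- ===== PORT A =====
-- _escape: str(s) on a str is the identity; the two .replace calls are ported exactly.
def pvEsc (s : String) : String :=
  PySem.Str.replace (PySem.Str.replace s "→" "$\\to$") "±" "$\\pm$"

-- _multirow(n, s)
def pvMultirow (n : Int) (s : String) : String :=
  "\\multirow{" ++ PySem.Int.toStr n ++ "}{*}{" ++ s ++ "}"

-- inner while loop of A: advance j while col_values[j] == val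
def pvScanA (cv : List String) (val : String) (j : Nat) : Nat :=
  if j < cv.length ∧ (cv.getD j "" == val) = true then pvScanA cv val (j + 1) else j
termination_by cv.length - j
decreasing_by omega

theorem pvScanA_ge (cv : List String) (val : String) (j : Nat) : j ≤ pvScanA cv val j := by
  fun_induction pvScanA cv val j with
  | case1 j _h ih => omega
  | case2 j _ => omega

-- outer while loop of A, with the growing `result` accumulator
def pvLoopA (cv : List String) (i : Nat) (result : List String) : List String :=
  if h : i < cv.length then
    let val := cv.getD i ""
    let j := pvScanA cv val (i + 1)
    let n := j - i
    pvLoopA cv j (result ++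
      [if n > 1 then pvMultirow (n : Int) (pvEsc val) else pvEsc val] ++
      List.replicate (n - 1) "")
  else result
termination_by cv.length - i
decreasing_by
  have := pvScanA_ge cv (cv.getD i "") (i + 1)
  omega

def apply_multirow_py (col_values : List String) : List String :=
  pvLoopA col_values 0 []

-- ===== PORT B =====
-- _run_lengths: the backward loop (k from n-1 down to 0, reading the previously
-- computed entry for k+1) is rendered as the structural recursion from the right.
def pvRunlens : List String → List Nat
  | [] => []
  | v :: rest =>
    let rs := pvRunlens rest
    (match rest.head?, rs.head? with
     | some w, some m => if (v == w) = true then m + 1 else 1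
     | _, _ => 1) :: rs

-- the body of B's comprehension: '' if p == v else (multirow if n > 1 else escape);
-- prev's None sentinel is Option.none (None == str is always False in Python).
def pvCell (v : String) (p : Option String) (n : Nat) : String :=
  if (p == some v) = true then ""
  else if n > 1 then pvMultirow (n : Int) (pvEsc v) else pvEsc v

-- zip(col_values, [None]+col_values, runlen) truncates to the shortest list, as zipWith3 does.
def apply_multirow_py_alt (col_values : List String) : List String :=
  List.zipWith3 pvCell col_values (none :: col_values.map some) (pvRunlens col_values)

-- ===== PRECONDITION & SPEC =====
def Spec_apply_multirow_py (col_values : List String) (out : List String) : Prop := out = apply_multirow_py_alt col_values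
instance (col_values : List String) (out : List String) : Decidable (Spec_apply_multirow_py col_values out) := by unfold Spec_apply_multirow_py; infer_instance

-- ===== CLAIM (what is proved, stated in full; the proofs are below) =====
def Claim_equal_apply_multirow_py : Prop := ∀ (col_values : List String), Dom_apply_multirow_py col_values → Spec_apply_multirow_py col_values (apply_multirow_py col_values)

-- ===== LEMMAS AND PROOFS =====

-- proof-only bridge: the rendering of one run (value, count)
def pvRender (r : String × Nat) : List String :=
  (if r.2 > 1 then pvMultirow (r.2 : Int) (pvEsc r.1) else pvEsc r.1) ::
    List.replicate (r.2 - 1) ""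

-- proof-only bridge: the list of maximal consecutive runs (value, count) of a column
def pvRuns (cv : List String) : List (String × Nat) :=
  cv.foldr
    (fun v runs =>
      match runs with
      | (w, c) :: rest => if (w == v) = true then (v, c + 1) :: rest else (v, 1) :: (w, c) :: rest
      | [] => [(v, 1)])
    []

theorem pv_dropWhile_eq_drop (p : String → Bool) (l : List String) :
    l.dropWhile p = l.drop (l.takeWhile p).length := by
  calc l.dropWhile p
      = (l.takeWhile p ++ l.dropWhile p).drop (l.takeWhile p).length := List.drop_left.symm
    _ = l.drop (l.takeWhile p).length := by rw [List.takeWhile_append_dropWhile]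

theorem pvRuns_cons (v : String) (rest : List String) :
    pvRuns (v :: rest) =
      (v, (rest.takeWhile (· == v)).length + 1) :: pvRuns (rest.dropWhile (· == v)) := by
  induction rest generalizing v with
  | nil => simp [pvRuns]
  | cons w rest' ih =>
    have hstep : pvRuns (v :: w :: rest') =
        match pvRuns (w :: rest') with
        | (x, c) :: r => if (x == v) = true then (v, c + 1) :: r else (v, 1) :: (x, c) :: r
        | [] => [(v, 1)] := rfl
    rw [hstep, ih w]
    by_cases hw : (w == v) = true
    · have hwv : w = v := eq_of_beq hw
      subst hwv
      simp
    · simp only [List.takeWhile_cons, List.dropWhile_cons, hw]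
      simp [(ih w).symm]

-- A's inner while loop computes i+1 plus the length of the run continuing val
theorem pvScanA_eq (cv : List String) (val : String) (j : Nat) :
    pvScanA cv val j = j + ((cv.drop j).takeWhile (· == val)).length := by
  fun_induction pvScanA cv val j with
  | case1 j h ih =>
    obtain ⟨hj, hv⟩ := h
    rw [ih, List.drop_eq_getElem_cons hj, List.takeWhile_cons]
    rw [List.getD_eq_getElem cv "" hj] at hv
    simp only [hv]
    simp; omega
  | case2 j h =>
    by_cases hj : j < cv.length
    · have hv : (cv.getD j "" == val) = false := by
        cases hb : (cv.getD j "" == val) with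
        | false => rfl
        | true => exact absurd ⟨hj, hb⟩ h
      rw [List.drop_eq_getElem_cons hj, List.takeWhile_cons]
      rw [List.getD_eq_getElem cv "" hj] at hv
      simp [hv]
    · rw [List.drop_eq_nil_iff.mpr (by omega)]
      simp

-- A's outer loop appends to `result` exactly the rendering of the runs of the unprocessed tail
theorem pvLoopA_eq (cv : List String) (i : Nat) (acc : List String) :
    pvLoopA cv i acc = acc ++ (pvRuns (cv.drop i)).flatMap pvRender := by
  fun_induction pvLoopA cv i acc with
  | case1 i acc h val j n ih =>
    have hval : val = cv[i] := List.getD_eq_getElem cv "" h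
    have hj : j = (i + 1) + ((cv.drop (i + 1)).takeWhile (· == val)).length :=
      pvScanA_eq cv val (i + 1)
    set t := (cv.drop (i + 1)).takeWhile (· == val) with ht
    have hn : n = t.length + 1 := by omega
    have hdropi : cv.drop i = val :: cv.drop (i + 1) := by
      rw [List.drop_eq_getElem_cons h, ← hval]
    have hdropj : cv.drop j = (cv.drop (i + 1)).dropWhile (· == val) := by
      rw [pv_dropWhile_eq_drop, ← ht, List.drop_drop, hj]
    refine ih.trans ?_
    rw [hdropi, pvRuns_cons, ← ht, ← hdropj]
    simp [pvRender, hn, List.append_assoc]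
  | case2 i acc h =>
    rw [List.drop_eq_nil_iff.mpr (by omega)]
    simp [pvRuns]

-- proof-only view of B: its comprehension with the predecessor of the first cell abstracted
def pvG (l : List String) (p : Option String) : List String :=
  List.zipWith3 pvCell l (p :: l.map some) (pvRunlens l)

-- the DP table of a cons: head is the length of the first run, tail is the table of the tail
theorem pvRunlens_cons (v : String) (rest : List String) :
    pvRunlens (v :: rest) = ((rest.takeWhile (· == v)).length + 1) :: pvRunlens rest := by
  induction rest generalizing v with
  | nil => simp [pvRunlens]
  | cons w rest' ih =>
    have hstep : pvRunlens (v :: w :: rest') =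
        (match (w :: rest').head?, (pvRunlens (w :: rest')).head? with
         | some w', some m => if (v == w') = true then m + 1 else 1
         | _, _ => 1) :: pvRunlens (w :: rest') := rfl
    rw [hstep, ih w]
    by_cases hw : (v == w) = true
    · have hvw : v = w := eq_of_beq hw
      subst hvw
      simp
    · have hw' : (w == v) = false := by
        cases hb : (w == v) with
        | false => rfl
        | true => exact absurd (by simpa using (eq_of_beq hb).symm) (by simpa using hw)
      simp [hw, hw']

theorem pvG_cons (v : String) (rest : List String) (p : Option String) :
    pvG (v :: rest) p =
      pvCell v p ((rest.takeWhile (· == v)).length + 1) :: pvG rest (some v) := by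
  unfold pvG
  rw [pvRunlens_cons]
  rfl

-- within a run, every cell equals its predecessor and B emits ''
theorem pvG_consume (t : List String) (v : String) (d : List String)
    (ht : ∀ x ∈ t, (x == v) = true) :
    pvG (t ++ d) (some v) = List.replicate t.length "" ++ pvG d (some v) := by
  induction t generalizing v with
  | nil => simp
  | cons w t' ih =>
    have hwv : w = v := eq_of_beq (ht w (by simp))
    subst hwv
    rw [List.cons_append, pvG_cons]
    have hcell : pvCell w (some w) (((t' ++ d).takeWhile (· == w)).length + 1) = "" := by
      simp [pvCell]
    rw [hcell, ih w (fun x hx => ht x (by simp [hx]))]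
    simp [List.replicate_succ]

-- the head of dropWhile falsifies the predicate
theorem pv_head_dropWhile (p : String → Bool) (l : List String) (w : String)
    (hw : (l.dropWhile p).head? = some w) : p w = false := by
  induction l with
  | nil => simp at hw
  | cons x l' ih =>
    rw [List.dropWhile_cons] at hw
    by_cases hx : p x = true
    · rw [if_pos hx] at hw; exact ih hw
    · rw [if_neg hx] at hw
      simp at hw
      subst hw
      simpa using hx

-- B renders exactly the runs, provided the first cell differs from its (abstracted) predecessor
theorem pvG_eq (n : Nat) :
    ∀ l : List String, l.length ≤ n → ∀ p : Option String,
      (∀ v, l.head? = some v → (p == some v) = false) →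
      pvG l p = (pvRuns l).flatMap pvRender := by
  induction n with
  | zero =>
    intro l hl p _
    have : l = [] := List.eq_nil_of_length_eq_zero (by omega)
    subst this
    simp [pvG, pvRuns, List.zipWith3]
  | succ n ih =>
    intro l hl p hp
    match l with
    | [] => simp [pvG, pvRuns, List.zipWith3]
    | v :: rest =>
      have hpv : (p == some v) = false := hp v rfl
      set t := rest.takeWhile (· == v) with ht
      set d := rest.dropWhile (· == v) with hd
      have hrest : rest = t ++ d := (List.takeWhile_append_dropWhile).symm
      rw [pvG_cons, pvRuns_cons, ← ht, ← hd]
      have hcell : pvCell v p (t.length + 1) =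
          (if t.length + 1 > 1 then pvMultirow ((t.length + 1 : Nat) : Int) (pvEsc v)
           else pvEsc v) := by
        simp [pvCell, hpv]
      have hG : pvG rest (some v) = List.replicate t.length "" ++ pvG d (some v) := by
        conv_lhs => rw [hrest]
        exact pvG_consume t v d
          (fun x hx => List.mem_takeWhile_imp (p := (· == v)) (l := rest) (by rw [← ht]; exact hx))
      have hdlen : d.length ≤ n := by
        have h1 : d.length ≤ rest.length := by rw [hd]; exact List.length_dropWhile_le _ _
        simp at hl
        omega
      have hdhead : ∀ w, d.head? = some w → ((some v : Option String) == some w) = false := by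
        intro w hw
        have hwf : (w == v) = false := pv_head_dropWhile _ rest w (hd ▸ hw)
        have hne : ¬ w = v := by simpa using hwf
        have hsome : ((some v : Option String) == some w) = (v == w) := rfl
        rw [hsome]
        exact beq_eq_false_iff_ne.mpr (fun h => hne h.symm)
      rw [hcell, hG, ih d hdlen (some v) hdhead]
      simp [pvRender]

-- ===== VERDICT (by name: the statement is the Claim_ definition above) =====
theorem apply_multirow_py_spec : Claim_equal_apply_multirow_py := by
  intro cv _dom
  show apply_multirow_py cv = apply_multirow_py_alt cv
  have hA : apply_multirow_py cv = (pvRuns cv).flatMap pvRender := by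
    unfold apply_multirow_py
    rw [pvLoopA_eq cv 0 []]
    simp
  have hB : apply_multirow_py_alt cv = pvG cv none := rfl
  rw [hA, hB, pvG_eq cv.length cv (le_refl _) none (by intro v _; rfl)]
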